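-- pv_equiv track=rewrite | github.com/bishal5917/LeetCoding | BFSinGrid.py | BFSInGrid
-- ===== SOURCE A (Python) =====
-- def BFSInGrid(grid):
--
--     visited = [[0, 0]]
--     queue = [[0, 0]]
--
--     while queue:
--         first = queue.pop(0)
--         allneighs = getNeighbors(first[0], first[1], grid)
--         for item in allneighs:
--             if item not in visited and grid[item[0]][item[1]] != "0":
--                 queue.append(item)
--                 visited.append(item)
--
--     return visited
--
-- def getNeighbors(row, col, graph):
--     neighbors = []
--     if (col + 1) <= len(graph[0]) - 1:
--         neighbors.append([row, col + 1])
--     if (col - 1) >= 0: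
--         neighbors.append([row, col - 1])
--     if (row - 1) >= 0:
--         neighbors.append([row - 1, col])
--     if (row + 1) <= len(graph) - 1:
--         neighbors.append([row + 1, col])
--     return neighbors
-- ===== SOURCE B (Python) =====
-- def BFSInGrid(grid):
--     # Level-synchronized BFS: instead of a FIFO queue popped cell by cell, process the
--     # traversal one whole frontier (BFS level) at a time, emitting each level in bulk.
--     rows, cols = len(grid), len(grid[0])
--     seen = {(0, 0)}
--     frontier = [(0, 0)]
--     out = []
--     while frontier:
--         out.extend([r, c] for r, c in frontier)
--         nxt = []
--         for r, c in frontier: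
--             for nb in ((r, c + 1), (r, c - 1), (r - 1, c), (r + 1, c)):
--                 if 0 <= nb[0] < rows and 0 <= nb[1] < cols and nb not in seen and grid[nb[0]][nb[1]] != "0":
--                     seen.add(nb)
--                     nxt.append(nb)
--         frontier = nxt
--     return out
-- ===== Notes on version B (the rewrite author's own statement) =====
-- stated objective: faster
-- what changed: Replaces A's cell-by-cell FIFO queue (pop(0) plus linear 'not in visited' scans and the getNeighbors helper) by level-synchronized BFS: the traversal processes one whole frontier per outer iteration, emits each level in bulk, builds the next frontier with a hash-set membership test and inline bounds checks.
-- outside the precondition, e.g. on BFSInGrid([[]]): A returns [[0, 0]], B returns [[0, 0]]; on BFSInGrid([[], ['1']]): A returns [[0, 0], [1, 0]], B returns [[0, 0]]; on BFSInGrid([['1', '0'], ['0']]): A returns [[0, 0]], B returns [[0, 0]]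
import Mathlib
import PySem

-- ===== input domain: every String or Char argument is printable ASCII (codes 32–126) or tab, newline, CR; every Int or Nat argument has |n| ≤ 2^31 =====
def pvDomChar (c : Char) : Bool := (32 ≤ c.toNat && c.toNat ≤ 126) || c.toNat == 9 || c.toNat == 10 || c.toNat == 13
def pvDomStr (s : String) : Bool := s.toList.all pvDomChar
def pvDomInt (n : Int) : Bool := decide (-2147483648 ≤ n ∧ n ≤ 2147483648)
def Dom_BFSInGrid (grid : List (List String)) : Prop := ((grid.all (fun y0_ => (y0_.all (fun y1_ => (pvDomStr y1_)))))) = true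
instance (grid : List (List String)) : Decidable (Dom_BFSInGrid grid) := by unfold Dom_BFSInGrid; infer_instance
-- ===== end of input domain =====

-- B replaces A's cell-by-cell FIFO queue (pop(0), linear `not in visited` scans, getNeighbors helper)
-- by level-synchronized BFS: whole frontiers processed per outer iteration, emitted in bulk, with a
-- set of seen (row,col) pairs and inline bounds checks in the same neighbor order.


-- shared tiny helpers: xs[i] and grid[r][c]; the .getD defaults stand for IndexError, excluded by Pre_
def pvIdx (xs : List Int) (i : Int) : Int := (PySem.List.pyGet? xs i).getD 0
def pvCell (grid : List (List String)) (r c : Int) : String :=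
  ((PySem.List.pyGet? (((PySem.List.pyGet? grid r).getD [])) c).getD "")

-- ===== PORT A =====
-- getNeighbors: len(graph[0]) raises IndexError on graph = [] (excluded by Pre_); .getD [] stands for it
def getNeighbors (row col : Int) (graph : List (List String)) : List (List Int) :=
  let neighbors : List (List Int) := []
  let neighbors := if col + 1 ≤ (((PySem.List.pyGet? graph 0).getD []).length : Int) - 1 then neighbors ++ [[row, col + 1]] else neighbors
  let neighbors := if col - 1 ≥ 0 then neighbors ++ [[row, col - 1]] else neighbors
  let neighbors := if row - 1 ≥ 0 then neighbors ++ [[row - 1, col]] else neighbors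
  let neighbors := if row + 1 ≤ (graph.length : Int) - 1 then neighbors ++ [[row + 1, col]] else neighbors
  neighbors

-- body of A's inner `for item in allneighs` loop, on the state (visited, queue)
def bfsStepA (grid : List (List String)) (st : List (List Int) × List (List Int)) (item : List Int) :
    List (List Int) × List (List Int) :=
  if item ∉ st.1 ∧ pvCell grid (pvIdx item 0) (pvIdx item 1) ≠ "0"
  then (st.1 ++ [item], st.2 ++ [item]) else st

-- A's `while queue` loop; fuel = rows*cols+1 bounds the pops (each pop matches one distinct enqueued cell)
def bfsLoopA (grid : List (List String)) : Nat → List (List Int) → List (List Int) → List (List Int)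
  | 0, vis, _ => vis
  | _ + 1, vis, [] => vis
  | fuel + 1, vis, first :: rest =>
      let st := (getNeighbors (pvIdx first 0) (pvIdx first 1) grid).foldl (bfsStepA grid) (vis, rest)
      bfsLoopA grid fuel st.1 st.2

def BFSInGrid (grid : List (List String)) : List (List Int) :=
  bfsLoopA grid (grid.length * (grid.headD []).length + 1) [[0, 0]] [[0, 0]]

-- ===== PORT B =====
-- a frontier cell (r, c) as the output list [r, c]
def toCellL (p : Int × Int) : List Int := [p.1, p.2]

-- body of B's innermost `for nb in (...)` test, on the per-level state (nxt, seen)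
def stepB (grid : List (List String)) (rows cols : Int)
    (st : List (Int × Int) × PySem.Set (Int × Int)) (p : Int × Int) :
    List (Int × Int) × PySem.Set (Int × Int) :=
  if 0 ≤ p.1 ∧ p.1 < rows ∧ 0 ≤ p.2 ∧ p.2 < cols ∧ p ∉ st.2 ∧ pvCell grid p.1 p.2 ≠ "0"
  then (st.1 ++ [p], PySem.Set.add st.2 p) else st

-- one frontier cell: test its 4 neighbor candidates in order
def expandCell (grid : List (List String)) (rows cols : Int)
    (st : List (Int × Int) × PySem.Set (Int × Int)) (p : Int × Int) :
    List (Int × Int) × PySem.Set (Int × Int) :=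
  [(p.1, p.2 + 1), (p.1, p.2 - 1), (p.1 - 1, p.2), (p.1 + 1, p.2)].foldl (stepB grid rows cols) st

-- one whole level: collect the next frontier from the current one
def expandFrontier (grid : List (List String)) (rows cols : Int)
    (frontier : List (Int × Int)) (seen : PySem.Set (Int × Int)) :
    List (Int × Int) × PySem.Set (Int × Int) :=
  frontier.foldl (expandCell grid rows cols) ([], seen)

-- B's `while frontier` loop; fuel is a pure totality guard (one unit per level)
def levelLoop (grid : List (List String)) (rows cols : Int) :
    Nat → List (List Int) → PySem.Set (Int × Int) → List (Int × Int) → List (List Int)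
  | 0, out, _, _ => out
  | fuel + 1, out, seen, frontier =>
      if frontier = [] then out
      else
        let out := out ++ frontier.map toCellL
        let st := expandFrontier grid rows cols frontier seen
        levelLoop grid rows cols fuel out st.2 st.1

def BFSInGrid_alt (grid : List (List String)) : List (List Int) :=
  -- len(grid[0]) raises IndexError on grid = [] (excluded by Pre_); headD [] stands for it
  levelLoop grid (grid.length : Int) ((grid.headD []).length : Int)
    (grid.length * (grid.headD []).length + 1) [] (PySem.Set.ofList [(0, 0)]) [(0, 0)]

-- ===== PRECONDITION & SPEC =====
-- Pre_ excludes empty grids, grids whose first row is empty, and ragged grids with a row shorter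
-- than row 0: A takes its bounds from len(grid[0]) and len(grid) only, so on such inputs it raises
-- IndexError on most and returns an accidental value on the rest.
def Pre_BFSInGrid (grid : List (List String)) : Prop :=
  grid ≠ [] ∧ grid.headD [] ≠ [] ∧ ∀ row ∈ grid, (grid.headD []).length ≤ row.length
instance (grid : List (List String)) : Decidable (Pre_BFSInGrid grid) := by
  unfold Pre_BFSInGrid; infer_instance
def pvWitness_BFSInGrid : List (List String) := [["1", "1", "0"], ["0", "1", "1"]]

def Spec_BFSInGrid (grid : List (List String)) (out : List (List Int)) : Prop := out = BFSInGrid_alt grid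
instance (grid : List (List String)) (out : List (List Int)) : Decidable (Spec_BFSInGrid grid out) := by
  unfold Spec_BFSInGrid; infer_instance

-- ===== CLAIM (what is proved, stated in full; the proofs are below) =====
def Claim_equal_BFSInGrid : Prop :=
  ∀ (grid : List (List String)), Dom_BFSInGrid grid → Pre_BFSInGrid grid → Spec_BFSInGrid grid (BFSInGrid grid)

-- ===== LEMMAS AND PROOFS =====

-- number of in-range cells not yet in vis: the potential that pays for A's pops and B's levels
noncomputable def missingN (rows cols : Int) (vis : List (List Int)) : Nat :=
  ((Finset.Ico 0 rows ×ˢ Finset.Ico 0 cols).filter (fun p : Int × Int => toCellL p ∉ vis)).card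

-- B-side state invariant: seen holds exactly the cells of out ++ nxt, and nxt cells are in range
def GoodSt (rows cols : Int) (outComb : List (List Int))
    (b : List (Int × Int) × PySem.Set (Int × Int)) : Prop :=
  (∀ r c : Int, (r, c) ∈ b.2 ↔ [r, c] ∈ outComb ++ b.1.map toCellL) ∧
  (∀ q ∈ b.1, 0 ≤ q.1 ∧ q.1 < rows ∧ 0 ≤ q.2 ∧ q.2 < cols)

lemma pvIdx_pair0 (r c : Int) : pvIdx [r, c] 0 = r := by
  simp [pvIdx, PySem.List.pyGet?, PySem.List.pyIdx?]

lemma pvIdx_pair1 (r c : Int) : pvIdx [r, c] 1 = c := by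
  simp [pvIdx, PySem.List.pyGet?, PySem.List.pyIdx?]

lemma missing_append (rows cols : Int) (vis : List (List Int)) (p : Int × Int)
    (hr : 0 ≤ p.1 ∧ p.1 < rows ∧ 0 ≤ p.2 ∧ p.2 < cols) (hnm : toCellL p ∉ vis) :
    missingN rows cols (vis ++ [toCellL p]) + 1 ≤ missingN rows cols vis := by
  unfold missingN
  have hpmem : p ∈ (Finset.Ico 0 rows ×ˢ Finset.Ico 0 cols).filter
      (fun q : Int × Int => toCellL q ∉ vis) := by
    simp [Finset.mem_filter, Finset.mem_product, Finset.mem_Ico, hr.1, hr.2.1, hr.2.2.1, hr.2.2.2, hnm]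
  have hsub : (Finset.Ico 0 rows ×ˢ Finset.Ico 0 cols).filter
      (fun q : Int × Int => toCellL q ∉ vis ++ [toCellL p]) ⊆
      ((Finset.Ico 0 rows ×ˢ Finset.Ico 0 cols).filter
      (fun q : Int × Int => toCellL q ∉ vis)).erase p := by
    intro q hq
    simp only [Finset.mem_filter, List.mem_append, List.mem_singleton, not_or] at hq
    refine Finset.mem_erase.mpr ⟨?_, Finset.mem_filter.mpr ⟨hq.1, hq.2.1⟩⟩
    intro hqp; exact hq.2.2 (by rw [hqp])
  have h1 := Finset.card_le_card hsub
  rw [Finset.card_erase_of_mem hpmem] at h1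
  have h2 : 1 ≤ ((Finset.Ico 0 rows ×ˢ Finset.Ico 0 cols).filter
      (fun q : Int × Int => toCellL q ∉ vis)).card := Finset.card_pos.mpr ⟨p, hpmem⟩
  omega

lemma missing_le (rows cols : Int) (vis : List (List Int)) :
    missingN rows cols vis ≤ rows.toNat * cols.toNat := by
  unfold missingN
  calc _ ≤ (Finset.Ico (0:ℤ) rows ×ˢ Finset.Ico (0:ℤ) cols).card := Finset.card_filter_le _ _
  _ = _ := by rw [Finset.card_product, Int.card_Ico, Int.card_Ico]; simp

-- one candidate: A folds over (if cond then [[p.1,p.2]] else []), B applies one stepB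
lemma cand_match (grid : List (List String)) (rows cols : Int)
    (outComb : List (List Int)) (restL : List (List Int))
    (nxt : List (Int × Int)) (seen : PySem.Set (Int × Int))
    (p1 p2 : Int) (cond : Prop) [Decidable cond]
    (hiff : cond ↔ (0 ≤ p1 ∧ p1 < rows ∧ 0 ≤ p2 ∧ p2 < cols))
    (hG : GoodSt rows cols outComb (nxt, seen)) :
    ((if cond then [[p1, p2]] else []).foldl (bfsStepA grid)
        (outComb ++ nxt.map toCellL, restL ++ nxt.map toCellL)
      = (outComb ++ (stepB grid rows cols (nxt, seen) (p1, p2)).1.map toCellL,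
         restL ++ (stepB grid rows cols (nxt, seen) (p1, p2)).1.map toCellL)) ∧
    GoodSt rows cols outComb (stepB grid rows cols (nxt, seen) (p1, p2)) ∧
    missingN rows cols (outComb ++ (stepB grid rows cols (nxt, seen) (p1, p2)).1.map toCellL)
        + (stepB grid rows cols (nxt, seen) (p1, p2)).1.length
      ≤ missingN rows cols (outComb ++ nxt.map toCellL) + nxt.length := by
  obtain ⟨h3, h4⟩ := hG
  by_cases hc : cond
  · have hb := hiff.mp hc
    simp only [if_pos hc, List.foldl_cons, List.foldl_nil]
    by_cases hm : [p1, p2] ∉ outComb ++ nxt.map toCellL ∧ pvCell grid p1 p2 ≠ "0"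
    · have hseen : (p1, p2) ∉ seen := fun hmem => hm.1 ((h3 p1 p2).mp hmem)
      have hBeq : stepB grid rows cols (nxt, seen) (p1, p2) = (nxt ++ [(p1, p2)], PySem.Set.add seen (p1, p2)) := by
        rw [stepB, if_pos ⟨hb.1, hb.2.1, hb.2.2.1, hb.2.2.2, hseen, hm.2⟩]
      have hAeq : bfsStepA grid (outComb ++ nxt.map toCellL, restL ++ nxt.map toCellL) [p1, p2]
          = (outComb ++ nxt.map toCellL ++ [[p1, p2]], restL ++ nxt.map toCellL ++ [[p1, p2]]) := by
        rw [bfsStepA, if_pos (by rw [pvIdx_pair0, pvIdx_pair1]; exact hm)]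
      rw [hBeq, hAeq]
      refine ⟨by simp [toCellL], ⟨?_, ?_⟩, ?_⟩
      · intro r c
        rw [PySem.Set.mem_add]
        simp only [List.map_append, List.map_cons, List.map_nil, toCellL, h3, List.mem_append,
          List.mem_singleton, Prod.mk.injEq, List.cons.injEq, and_true]
        tauto
      · intro q hq
        rcases List.mem_append.mp hq with hq | hq
        · exact h4 q hq
        · have : q = (p1, p2) := by simpa using hq
          subst this; exact hb
      · have hmiss := missing_append rows cols (outComb ++ nxt.map toCellL) (p1, p2) hb hm.1
        simp only [toCellL] at hmiss
        simp only [List.map_append, List.map_cons, List.map_nil, toCellL, List.length_append,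
          List.length_cons, List.length_nil, ← List.append_assoc]
        omega
    · have hBeq : stepB grid rows cols (nxt, seen) (p1, p2) = (nxt, seen) := by
        rw [stepB, if_neg]
        rintro ⟨-, -, -, -, hseen, hwall⟩
        exact hm ⟨fun hmem => hseen ((h3 p1 p2).mpr hmem), hwall⟩
      have hAeq : bfsStepA grid (outComb ++ nxt.map toCellL, restL ++ nxt.map toCellL) [p1, p2]
          = (outComb ++ nxt.map toCellL, restL ++ nxt.map toCellL) := by
        rw [bfsStepA, if_neg (by rw [pvIdx_pair0, pvIdx_pair1]; exact hm)]
      rw [hBeq, hAeq]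
      exact ⟨by simp, ⟨h3, h4⟩, le_refl _⟩
  · have hBeq : stepB grid rows cols (nxt, seen) (p1, p2) = (nxt, seen) := by
      rw [stepB, if_neg]
      rintro ⟨ha, hb', hc', hd, -⟩
      exact hc (hiff.mpr ⟨ha, hb', hc', hd⟩)
    rw [hBeq]
    simp only [if_neg hc, List.foldl_nil]
    exact ⟨by simp, ⟨h3, h4⟩, le_refl _⟩

lemma getNeighbors_eq (row col : Int) (graph : List (List String)) :
    getNeighbors row col graph =
      (if col + 1 ≤ (((PySem.List.pyGet? graph 0).getD []).length : Int) - 1 then [[row, col + 1]] else []) ++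
      (if col - 1 ≥ 0 then [[row, col - 1]] else []) ++
      (if row - 1 ≥ 0 then [[row - 1, col]] else []) ++
      (if row + 1 ≤ (graph.length : Int) - 1 then [[row + 1, col]] else []) := by
  simp only [getNeighbors]
  split_ifs <;> simp

-- one popped frontier cell: A's fold over getNeighbors matches B's expandCell
lemma cell_match (grid : List (List String)) (rows cols : Int)
    (hrows : (grid.length : Int) = rows)
    (hL : ((((PySem.List.pyGet? grid 0).getD []).length : Nat) : Int) = cols)
    (outComb : List (List Int)) (restL : List (List Int))
    (nxt : List (Int × Int)) (seen : PySem.Set (Int × Int))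
    (r c : Int) (hr : 0 ≤ r ∧ r < rows ∧ 0 ≤ c ∧ c < cols)
    (hG : GoodSt rows cols outComb (nxt, seen)) :
    ((getNeighbors r c grid).foldl (bfsStepA grid)
        (outComb ++ nxt.map toCellL, restL ++ nxt.map toCellL)
      = (outComb ++ (expandCell grid rows cols (nxt, seen) (r, c)).1.map toCellL,
         restL ++ (expandCell grid rows cols (nxt, seen) (r, c)).1.map toCellL)) ∧
    GoodSt rows cols outComb (expandCell grid rows cols (nxt, seen) (r, c)) ∧
    missingN rows cols (outComb ++ (expandCell grid rows cols (nxt, seen) (r, c)).1.map toCellL)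
        + (expandCell grid rows cols (nxt, seen) (r, c)).1.length
      ≤ missingN rows cols (outComb ++ nxt.map toCellL) + nxt.length := by
  obtain ⟨hr1, hr2, hc1, hc2⟩ := hr
  rw [getNeighbors_eq, hL, hrows]
  simp only [expandCell, List.foldl_append, List.foldl_cons, List.foldl_nil]
  obtain ⟨e1A, e1G, e1m⟩ := cand_match grid rows cols outComb restL nxt seen r (c + 1)
    (c + 1 ≤ cols - 1) (by constructor <;> (intro h; omega)) ⟨hG.1, hG.2⟩
  obtain ⟨e2A, e2G, e2m⟩ := cand_match grid rows cols outComb restL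
    (stepB grid rows cols (nxt, seen) (r, c + 1)).1 (stepB grid rows cols (nxt, seen) (r, c + 1)).2
    r (c - 1) (c - 1 ≥ 0) (by constructor <;> (intro h; omega)) e1G
  obtain ⟨e3A, e3G, e3m⟩ := cand_match grid rows cols outComb restL
    (stepB grid rows cols (stepB grid rows cols (nxt, seen) (r, c + 1)) (r, c - 1)).1
    (stepB grid rows cols (stepB grid rows cols (nxt, seen) (r, c + 1)) (r, c - 1)).2
    (r - 1) c (r - 1 ≥ 0) (by constructor <;> (intro h; omega)) e2G
  obtain ⟨e4A, e4G, e4m⟩ := cand_match grid rows cols outComb restL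
    (stepB grid rows cols (stepB grid rows cols (stepB grid rows cols (nxt, seen) (r, c + 1)) (r, c - 1)) (r - 1, c)).1
    (stepB grid rows cols (stepB grid rows cols (stepB grid rows cols (nxt, seen) (r, c + 1)) (r, c - 1)) (r - 1, c)).2
    (r + 1) c (r + 1 ≤ rows - 1) (by constructor <;> (intro h; omega)) e3G
  exact ⟨by rw [e1A, e2A, e3A, e4A], e4G,
    le_trans e4m (le_trans e3m (le_trans e2m e1m))⟩

-- the rest of one level: A pops the remaining frontier cells one by one, B folds expandCell over them
lemma inner_match (grid : List (List String)) (rows cols : Int)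
    (hrows : (grid.length : Int) = rows)
    (hL : ((((PySem.List.pyGet? grid 0).getD []).length : Nat) : Int) = cols) :
    ∀ (rest : List (Int × Int)) (fuel : Nat) (outComb : List (List Int))
      (nxt : List (Int × Int)) (seen : PySem.Set (Int × Int)),
      GoodSt rows cols outComb (nxt, seen) →
      (∀ p ∈ rest, 0 ≤ p.1 ∧ p.1 < rows ∧ 0 ≤ p.2 ∧ p.2 < cols) →
      (bfsLoopA grid (rest.length + fuel) (outComb ++ nxt.map toCellL)
          (rest.map toCellL ++ nxt.map toCellL)
        = bfsLoopA grid fuel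
            (outComb ++ (rest.foldl (expandCell grid rows cols) (nxt, seen)).1.map toCellL)
            ((rest.foldl (expandCell grid rows cols) (nxt, seen)).1.map toCellL)) ∧
      GoodSt rows cols outComb (rest.foldl (expandCell grid rows cols) (nxt, seen)) ∧
      missingN rows cols (outComb ++ (rest.foldl (expandCell grid rows cols) (nxt, seen)).1.map toCellL)
          + (rest.foldl (expandCell grid rows cols) (nxt, seen)).1.length
        ≤ missingN rows cols (outComb ++ nxt.map toCellL) + nxt.length := by
  intro rest
  induction rest with
  | nil =>
    intro fuel outComb nxt seen hG _
    exact ⟨by simp, hG, le_refl _⟩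
  | cons p rest ih =>
    intro fuel outComb nxt seen hG hrest
    obtain ⟨r, c⟩ := p
    have hrc := hrest (r, c) (List.mem_cons_self)
    have hfuel : ((r, c) :: rest).length + fuel = (rest.length + fuel) + 1 := by
      simp only [List.length_cons]; omega
    have hq : ((r, c) :: rest).map toCellL ++ nxt.map toCellL
        = toCellL (r, c) :: (rest.map toCellL ++ nxt.map toCellL) := by
      simp only [List.map_cons, List.cons_append]
    rw [hfuel, hq]
    obtain ⟨cA, cG, cm⟩ := cell_match grid rows cols hrows hL outComb (rest.map toCellL)
      nxt seen r c hrc hG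
    have hloop : bfsLoopA grid ((rest.length + fuel) + 1) (outComb ++ nxt.map toCellL)
        (toCellL (r, c) :: (rest.map toCellL ++ nxt.map toCellL))
        = bfsLoopA grid (rest.length + fuel)
            (outComb ++ (expandCell grid rows cols (nxt, seen) (r, c)).1.map toCellL)
            (rest.map toCellL ++ (expandCell grid rows cols (nxt, seen) (r, c)).1.map toCellL) := by
      rw [bfsLoopA]
      simp only [toCellL, pvIdx_pair0, pvIdx_pair1]
      rw [cA]
    rw [hloop]
    have hfold : (((r, c) :: rest).foldl (expandCell grid rows cols) (nxt, seen))
        = rest.foldl (expandCell grid rows cols) (expandCell grid rows cols (nxt, seen) (r, c)) := by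
      simp only [List.foldl_cons]
    rw [hfold]
    obtain ⟨iA, iG, im⟩ := ih fuel outComb (expandCell grid rows cols (nxt, seen) (r, c)).1
      (expandCell grid rows cols (nxt, seen) (r, c)).2 cG
      (fun q hq => hrest q (List.mem_cons_of_mem _ hq))
    exact ⟨iA, iG, le_trans im cm⟩

-- the whole traversal: A's pop loop equals B's level loop, given enough fuel on both sides
lemma outer_match (grid : List (List String)) (rows cols : Int)
    (hrows : (grid.length : Int) = rows)
    (hL : ((((PySem.List.pyGet? grid 0).getD []).length : Nat) : Int) = cols) :
    ∀ (fuelB fuelA : Nat) (out : List (List Int))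
      (seen : PySem.Set (Int × Int)) (frontier : List (Int × Int)),
      GoodSt rows cols out (frontier, seen) →
      frontier.length + missingN rows cols (out ++ frontier.map toCellL) ≤ fuelA →
      (frontier ≠ [] → missingN rows cols (out ++ frontier.map toCellL) + 1 ≤ fuelB) →
      bfsLoopA grid fuelA (out ++ frontier.map toCellL) (frontier.map toCellL)
        = levelLoop grid rows cols fuelB out seen frontier := by
  intro fuelB
  induction fuelB with
  | zero =>
    intro fuelA out seen frontier hG hA hB
    rcases eq_or_ne frontier [] with he | he
    · subst he
      simp only [List.map_nil, List.append_nil]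
      cases fuelA <;> rw [bfsLoopA] <;> rw [levelLoop]
    · exact absurd (hB he) (by omega)
  | succ f ih =>
    intro fuelA out seen frontier hG hA hB
    rcases eq_or_ne frontier [] with he | he
    · subst he
      simp only [List.map_nil, List.append_nil]
      cases fuelA <;> rw [bfsLoopA] <;> rw [levelLoop] <;> rw [if_pos rfl]
    · rw [levelLoop, if_neg he]
      obtain ⟨f', hf'⟩ : ∃ f', fuelA = frontier.length + f' :=
        ⟨fuelA - frontier.length, by omega⟩
      subst hf'
      have hGlevel : GoodSt rows cols (out ++ frontier.map toCellL) ([], seen) := by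
        refine ⟨?_, ?_⟩
        · intro r c
          simpa using hG.1 r c
        · intro q hq; simp at hq
      obtain ⟨iA, iG, im⟩ := inner_match grid rows cols hrows hL frontier f'
        (out ++ frontier.map toCellL) [] seen hGlevel hG.2
      simp only [List.map_nil, List.append_nil] at iA im
      rw [iA]
      have hmono : missingN rows cols (out ++ frontier.map toCellL ++
          (frontier.foldl (expandCell grid rows cols) ([], seen)).1.map toCellL)
          + (frontier.foldl (expandCell grid rows cols) ([], seen)).1.length
          ≤ missingN rows cols (out ++ frontier.map toCellL) := im
      have hAnext : (frontier.foldl (expandCell grid rows cols) ([], seen)).1.length +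
          missingN rows cols ((out ++ frontier.map toCellL) ++
            (frontier.foldl (expandCell grid rows cols) ([], seen)).1.map toCellL) ≤ f' := by
        omega
      have hBnext : (frontier.foldl (expandCell grid rows cols) ([], seen)).1 ≠ [] →
          missingN rows cols ((out ++ frontier.map toCellL) ++
            (frontier.foldl (expandCell grid rows cols) ([], seen)).1.map toCellL) + 1 ≤ f := by
        intro hne
        have hlen : 1 ≤ (frontier.foldl (expandCell grid rows cols) ([], seen)).1.length := by
          cases hfe : (frontier.foldl (expandCell grid rows cols) ([], seen)).1 with
          | nil => exact absurd hfe hne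
          | cons a l => simp
        have := hB he
        omega
      exact ih f' (out ++ frontier.map toCellL)
        (frontier.foldl (expandCell grid rows cols) ([], seen)).2
        (frontier.foldl (expandCell grid rows cols) ([], seen)).1 iG hAnext hBnext

lemma head_eq_pyGet (grid : List (List String)) (hne : grid ≠ []) :
    (PySem.List.pyGet? grid 0).getD [] = grid.headD [] := by
  cases grid with
  | nil => exact absurd rfl hne
  | cons g t => rw [PySem.List.pyGet?_zero_cons, Option.getD_some, List.headD_cons]

-- ===== VERDICT (by name: the statement is the Claim_ definition above) =====
theorem BFSInGrid_spec : Claim_equal_BFSInGrid := by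
  intro grid _ hpre
  obtain ⟨hne, hhead, -⟩ := hpre
  unfold Spec_BFSInGrid BFSInGrid BFSInGrid_alt
  have hrows0 : 0 < grid.length := List.length_pos_iff.mpr hne
  have hcols0 : 0 < (grid.headD []).length := List.length_pos_iff.mpr hhead
  have hL : ((((PySem.List.pyGet? grid 0).getD []).length : Nat) : Int)
      = (((grid.headD []).length : Nat) : Int) := by rw [head_eq_pyGet grid hne]
  have hG : GoodSt (grid.length : Int) ((grid.headD []).length : Int) []
      ([(0, 0)], PySem.Set.ofList [(0, 0)]) := by
    refine ⟨?_, ?_⟩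
    · intro r c
      rw [PySem.Set.mem_ofList]
      simp [toCellL, Prod.ext_iff]
    · intro q hq
      have : q = ((0 : Int), (0 : Int)) := by simpa using hq
      subst this
      refine ⟨le_refl 0, ?_, le_refl 0, ?_⟩
      · show (0 : Int) < (grid.length : Int); exact_mod_cast hrows0
      · show (0 : Int) < ((grid.headD []).length : Int); exact_mod_cast hcols0
  have hmiss : missingN (grid.length : Int) ((grid.headD []).length : Int)
      ([] ++ [((0 : Int), (0 : Int))].map toCellL) ≤ grid.length * (grid.headD []).length := by
    have := missing_le (grid.length : Int) ((grid.headD []).length : Int)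
      ([] ++ [((0 : Int), (0 : Int))].map toCellL)
    simpa using this
  have hout := outer_match grid (grid.length : Int) ((grid.headD []).length : Int) rfl hL
    (grid.length * (grid.headD []).length + 1) (grid.length * (grid.headD []).length + 1)
    [] (PySem.Set.ofList [(0, 0)]) [((0 : Int), (0 : Int))] hG
    (by simp only [List.length_cons, List.length_nil]; omega)
    (fun _ => by omega)
  simpa [toCellL] using hout
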